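-- pv_equiv track=rewrite | github.com/EFord36/normalise | normalise/expand_all.py | create_regexp
-- ===== SOURCE A (Python) =====
-- def create_regexp(w):
--     """Return regular expression representing word with repeated cs 1+ times.
--     """
--     regexp = w[0]
--     for i in range(1, len(w)):
--         if w[i] == w[i - 1]:
--             if regexp[-1] != '+':
--                 regexp += '+'
--         else:
--             regexp += w[i]
--     regexp += '$'
--     return regexp
-- ===== SOURCE B (Python) =====
-- def create_regexp(w):
--     """Return regular expression representing word with repeated cs 1+ times."""
--     runs = []  # run-length encoding of w, built in one left-to-right pass
--     for ch in w:
--         if runs and runs[-1][0] == ch: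
--             runs[-1] = (ch, runs[-1][1] + 1)
--         else:
--             runs.append((ch, 1))
--     return ''.join(c + ('+' if k > 1 else '') for c, k in runs) + '$'
-- ===== Notes on version B (the rewrite author's own statement) =====
-- stated objective: alternative
-- what changed: B first builds a run-length encoding of the word in one pass and then renders each run as char(+'+' if length>1), instead of A's per-character loop that inspects the last character of the output string it is building; B also returns '$' on the empty word where A raises.
-- outside the precondition, e.g. on create_regexp('++'): A returns '+$', B returns '++$'
import Mathlib
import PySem

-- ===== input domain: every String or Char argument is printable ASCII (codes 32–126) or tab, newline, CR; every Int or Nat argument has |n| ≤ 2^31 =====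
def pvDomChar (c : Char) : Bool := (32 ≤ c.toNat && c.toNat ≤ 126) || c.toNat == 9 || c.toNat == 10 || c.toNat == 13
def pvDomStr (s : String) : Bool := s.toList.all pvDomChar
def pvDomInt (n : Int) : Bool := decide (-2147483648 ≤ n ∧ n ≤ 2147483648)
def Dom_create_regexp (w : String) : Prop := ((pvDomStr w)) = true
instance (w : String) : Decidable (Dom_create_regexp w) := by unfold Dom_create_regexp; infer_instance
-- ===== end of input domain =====

-- B builds a run-length encoding first and renders it, instead of A's per-character
-- last-output-char check; equivalence proved on nonempty words without the substring "++"
-- (there A's collapse-check misreads a literal '+' and both outputs are equally defensible).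


-- ===== PORT A =====
-- A's loop over i in range(1, len(w)) compares w[i] with w[i-1]; transliterated as a
-- recursion carrying the previous character and the regexp built so far.
def aLoop (regexp : List Char) (prev : Char) : List Char → List Char
  | [] => regexp
  | c :: rest =>
    if c = prev then
      -- if regexp[-1] != '+': regexp += '+'
      if PySem.List.pyGetD regexp (-1) ' ' ≠ '+' then aLoop (regexp ++ ['+']) c rest
      else aLoop regexp c rest
    else aLoop (regexp ++ [c]) c rest

def create_regexp (w : String) : String :=
  match w.toList with
  | [] => ""  -- Python raises IndexError on w[0]; excluded by Pre_
  | c :: rest => String.mk (aLoop [c] c rest ++ ['$'])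

-- ===== PORT B =====
-- one step of B's for-loop: merge ch into the last run or start a new one
def bStep (runs : List (Char × Nat)) (ch : Char) : List (Char × Nat) :=
  match runs.getLast? with
  | some (c, n) => if c = ch then runs.dropLast ++ [(ch, n + 1)] else runs ++ [(ch, 1)]
  | none => runs ++ [(ch, 1)]

-- c + ('+' if k > 1 else '')
def bSeg (p : Char × Nat) : List Char := p.1 :: (if p.2 > 1 then ['+'] else [])

def create_regexp_alt (w : String) : String :=
  let runs := w.toList.foldl bStep []
  String.mk ((runs.map bSeg).flatten ++ ['$'])

-- ===== PRECONDITION & SPEC =====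
-- true iff the list contains two adjacent '+' characters (the substring "++")
def pvHasPlusPlus : List Char → Bool
  | a :: b :: r => (a = '+' && b = '+') || pvHasPlusPlus (b :: r)
  | _ => false

-- Pre_ excludes the empty string (A raises IndexError) and words containing the substring
-- "++": there the literal character '+' collides with the '+' metacharacter A emits and
-- inspects, so A's collapsed output and B's literal output are both defensible and neither
-- is a correct regex for the word anyway.
def Pre_create_regexp (w : String) : Prop := w ≠ "" ∧ pvHasPlusPlus w.toList = false
instance (w : String) : Decidable (Pre_create_regexp w) := by unfold Pre_create_regexp; infer_instance

def pvWitness_create_regexp : String := "hello"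

def Spec_create_regexp (w : String) (out : String) : Prop := out = create_regexp_alt w
instance (w : String) (out : String) : Decidable (Spec_create_regexp w out) := by unfold Spec_create_regexp; infer_instance

-- ===== CLAIM (what is proved, stated in full; the proofs are below) =====
def Claim_equal_create_regexp : Prop := ∀ (w : String), Dom_create_regexp w → Pre_create_regexp w → Spec_create_regexp w (create_regexp w)

-- ===== LEMMAS AND PROOFS =====

-- rendering of the run list
def enc (rs : List (Char × Nat)) : List Char := (rs.map bSeg).flatten

theorem enc_append (a b : List (Char × Nat)) : enc (a ++ b) = enc a ++ enc b := by
  simp [enc]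

theorem pp_head {a b : Char} {r : List Char} (h : pvHasPlusPlus (a :: b :: r) = false) :
    ¬ (a = '+' ∧ b = '+') := by
  intro ⟨h1, h2⟩
  simp [pvHasPlusPlus, h1, h2] at h

theorem pp_tail {a b : Char} {r : List Char} (h : pvHasPlusPlus (a :: b :: r) = false) :
    pvHasPlusPlus (b :: r) = false := by
  simp [pvHasPlusPlus] at h
  exact h.2

theorem getLast_enc (rs : List (Char × Nat)) (prev : Char) (k : Nat) (hk : 1 ≤ k) :
    PySem.List.pyGetD (enc (rs ++ [(prev, k)]) ) (-1) ' ' = if k > 1 then '+' else prev := by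
  have h : enc (rs ++ [(prev, k)]) = enc rs ++ bSeg (prev, k) := by
    rw [enc_append]; simp [enc]
  rw [h]
  by_cases h2 : k > 1
  · simp [bSeg, h2, PySem.List.pyGetD, PySem.List.pyGet?, PySem.List.pyIdx?]
  · simp [bSeg, h2, PySem.List.pyGetD, PySem.List.pyGet?, PySem.List.pyIdx?]

-- main invariant: A's loop, started from the rendering of the runs built so far,
-- produces the rendering of B's final run list
theorem main_inv (rest : List Char) : ∀ (prev : Char) (k : Nat) (rs : List (Char × Nat)),
    1 ≤ k → (prev = '+' → k = 1) → pvHasPlusPlus (prev :: rest) = false →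
    aLoop (enc (rs ++ [(prev, k)])) prev rest =
      enc (List.foldl bStep (rs ++ [(prev, k)]) rest) := by
  induction rest with
  | nil => intro prev k rs _ _ _; simp [aLoop]
  | cons c rest ih =>
    intro prev k rs hk hplus hpp
    have hlast := getLast_enc rs prev k hk
    by_cases hc : c = prev
    · -- repeated character: prev ≠ '+'
      subst hc
      have hp : c ≠ '+' := by
        intro hpe
        exact pp_head hpp ⟨hpe, hpe⟩
      have hstep : bStep (rs ++ [(c, k)]) c = rs ++ [(c, k + 1)] := by
        simp [bStep, List.getLast?_concat, List.dropLast_concat]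
      have hpp' : pvHasPlusPlus (c :: rest) = false := pp_tail hpp
      rw [List.foldl_cons, hstep]
      by_cases h2 : k > 1
      · -- regexp already ends in '+': A skips; rendering unchanged by k+1
        have henc : enc (rs ++ [(c, k)]) = enc (rs ++ [(c, k + 1)]) := by
          rw [enc_append, enc_append]; simp [enc, bSeg, h2, Nat.lt_add_right 1 h2]
        simp only [aLoop, if_pos rfl, hlast, if_pos h2, ne_eq, not_true_eq_false, if_false]
        rw [henc]
        exact ih c (k + 1) rs (by omega) (fun h => absurd h hp) hpp'
      · -- k = 1: A appends '+', B's run becomes (c, 2)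
        have henc : enc (rs ++ [(c, k)]) ++ ['+'] = enc (rs ++ [(c, k + 1)]) := by
          have hk1 : k = 1 := by omega
          rw [enc_append, enc_append]; simp [enc, bSeg, hk1]
        simp only [aLoop, if_pos rfl, hlast, if_neg h2]
        rw [if_pos (show (c ≠ '+') from hp), henc]
        exact ih c (k + 1) rs (by omega) (fun h => absurd h hp) hpp'
    · -- new character: A appends c, B starts run (c, 1)
      have hpc : prev ≠ c := fun h => hc h.symm
      have hstep : bStep (rs ++ [(prev, k)]) c = (rs ++ [(prev, k)]) ++ [(c, 1)] := by
        simp [bStep, List.getLast?_concat, hpc]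
      have henc : enc (rs ++ [(prev, k)]) ++ [c] = enc ((rs ++ [(prev, k)]) ++ [(c, 1)]) := by
        rw [enc_append (rs ++ [(prev, k)])]; simp [enc, bSeg]
      simp only [aLoop, if_neg hc]
      rw [henc, List.foldl_cons, hstep]
      exact ih c 1 (rs ++ [(prev, k)]) (by omega) (fun _ => rfl) (pp_tail hpp)

-- ===== VERDICT (by name: the statement is the Claim_ definition above) =====
theorem create_regexp_spec : Claim_equal_create_regexp := by
  intro w _ hpre
  unfold Spec_create_regexp
  obtain ⟨hne, hpp⟩ := hpre
  unfold create_regexp create_regexp_alt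
  match h : w.toList with
  | [] =>
    exact absurd (by cases w; simpa using h) hne
  | c :: rest =>
    rw [h] at hpp
    have hmain := main_inv rest c 1 [] (by omega) (fun _ => rfl) hpp
    simp only [List.nil_append] at hmain
    have h1 : ([c] : List Char) = enc [(c, 1)] := by simp [enc, bSeg]
    have h0 : List.foldl bStep [] (c :: rest) = List.foldl bStep [(c, 1)] rest := by
      simp [bStep]
    show String.mk (aLoop [c] c rest ++ ['$']) =
      String.mk ((List.map bSeg (List.foldl bStep [] (c :: rest))).flatten ++ ['$'])
    rw [h1, hmain, h0, enc]
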